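-- pv_equiv track=rewrite | github.com/dalcon10028/programmers | level1/test_지폐_접기_340199.py | fold_money
-- ===== SOURCE A (Python) =====
-- def fold_money(wallet, bill, count = 0) -> int:
--     # bill의 작은 값이 wallet의 작은 값 보다 크거나 bill의 큰 값이 wallet의 큰 값 보다 크면
--     if min(bill) > min(wallet) or max(bill) > max(wallet):
--         # bill[0]이 bill[1]보다 크다면
--         if bill[0] > bill[1]:
--             # bill[0]을 2로 나누고 나머지는 버립니다.
--             bill[0] = bill[0] // 2
--         else:
--             # bill[1]을 2로 나누고 나머지는 버립니다.
--             bill[1] = bill[1] // 2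
--
--         # answer을 1 증가시킵니다
--         return fold_money(wallet, bill, count + 1)
--
--     else:
--         return count
-- ===== SOURCE B (Python) =====
-- def fold_money(wallet, bill, count=0) -> int:
--     # Iterative version: hoists wallet's min/max out of the loop, counts folds
--     # separately and adds them to the passed-in count; mutates bill in place like A.
--     lo, hi = min(wallet), max(wallet)
--     folds = 0
--     while min(bill) > lo or max(bill) > hi:
--         i = 0 if bill[0] > bill[1] else 1
--         bill[i] //= 2
--         folds += 1
--     return count + folds
-- ===== Notes on version B (the rewrite author's own statement) =====
-- stated objective: simpler
-- what changed: Replaced the tail recursion (which re-reads min/max of wallet every call and threads the counter through recursive calls, hitting Python's recursion limit) by a plain while loop with wallet's min/max hoisted out, a computed index i for the element to halve, and a separate fold counter added to the passed-in count at the end.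
import Mathlib
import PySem

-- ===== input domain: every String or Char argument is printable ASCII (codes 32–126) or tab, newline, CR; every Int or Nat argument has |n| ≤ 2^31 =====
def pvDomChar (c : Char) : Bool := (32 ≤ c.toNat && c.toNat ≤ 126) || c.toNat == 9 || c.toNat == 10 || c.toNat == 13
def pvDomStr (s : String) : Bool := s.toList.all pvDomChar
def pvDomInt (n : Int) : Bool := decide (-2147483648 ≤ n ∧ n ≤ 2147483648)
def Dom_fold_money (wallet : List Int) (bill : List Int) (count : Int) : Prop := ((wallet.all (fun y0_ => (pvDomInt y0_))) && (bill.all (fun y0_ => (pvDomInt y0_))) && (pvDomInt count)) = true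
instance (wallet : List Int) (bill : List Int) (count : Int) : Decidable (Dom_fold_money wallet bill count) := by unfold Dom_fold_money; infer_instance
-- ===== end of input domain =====

-- B replaces A's tail recursion by an iterative count of folds (wallet min/max hoisted out
-- of the loop, fold counter added to the passed-in count at the end); both mutate/keep bill
-- the same way, the equivalence proved is about the return value (A mutates bill in place).


-- ===== PORT A =====
-- literal transliteration of A's recursion; the Nat fuel only makes the recursion total
-- (under Pre_ the fuel is never exhausted, and the .getD 0 defaults of min?/max?/pyGetD
-- are never taken: Pre_ guarantees nonempty lists and, when the loop runs, bill[0]/bill[1]).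
def foldMoneyGoA : Nat → List Int → List Int → Int → Int
  | 0, _, _, count => count
  | n+1, wallet, bill, count =>
    if (PySem.List.min? bill (fun x => x)).getD 0 > (PySem.List.min? wallet (fun x => x)).getD 0
       ∨ (PySem.List.max? bill (fun x => x)).getD 0 > (PySem.List.max? wallet (fun x => x)).getD 0 then
      let bill' :=
        if PySem.List.pyGetD bill 0 0 > PySem.List.pyGetD bill 1 0 then
          PySem.List.pySetD bill 0 (PySem.Int.floordiv (PySem.List.pyGetD bill 0 0) 2)
        else
          PySem.List.pySetD bill 1 (PySem.Int.floordiv (PySem.List.pyGetD bill 1 0) 2)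
      foldMoneyGoA n wallet bill' (count + 1)
    else count

def fold_money (wallet : List Int) (bill : List Int) (count : Int) : Int :=
  foldMoneyGoA ((PySem.List.pyGetD bill 0 0).toNat + (PySem.List.pyGetD bill 1 0).toNat + 1)
    wallet bill count

-- ===== PORT B =====
-- literal transliteration of B's while loop: lo/hi are computed once, the loop returns the
-- number of folds (a Nat), added to count at the end; same totality fuel as above.
def foldCountB : Nat → Int → Int → List Int → Nat
  | 0, _, _, _ => 0
  | n+1, lo, hi, bill =>
    if (PySem.List.min? bill (fun x => x)).getD 0 > lo
       ∨ (PySem.List.max? bill (fun x => x)).getD 0 > hi then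
      let i : Int := if PySem.List.pyGetD bill 0 0 > PySem.List.pyGetD bill 1 0 then 0 else 1
      foldCountB n lo hi (PySem.List.pySetD bill i (PySem.Int.floordiv (PySem.List.pyGetD bill i 0) 2)) + 1
    else 0

def fold_money_alt (wallet : List Int) (bill : List Int) (count : Int) : Int :=
  count + (foldCountB ((PySem.List.pyGetD bill 0 0).toNat + (PySem.List.pyGetD bill 1 0).toNat + 1)
    ((PySem.List.min? wallet (fun x => x)).getD 0)
    ((PySem.List.max? wallet (fun x => x)).getD 0) bill : Nat)

-- ===== PRECONDITION & SPEC =====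
-- Pre_ excludes exactly the inputs on which A raises: empty wallet/bill (ValueError from
-- min/max), a bill shorter than 2 when the fold loop runs (IndexError), and the inputs on
-- which the recursion never ends (RecursionError: whenever the loop would halve a
-- non-positive element it runs forever).  Closed-form: either the guard is false at once,
-- or bill has ≥ 2 elements, every element past the first two is ≤ max(wallet), and either
-- min(wallet) ≥ 0 or (min(bill) ≤ min(wallet) and max(wallet) ≥ 0).
def Pre_fold_money (wallet : List Int) (bill : List Int) (count : Int) : Prop :=
  wallet ≠ [] ∧ bill ≠ [] ∧
  ( ((PySem.List.min? bill (fun x => x)).getD 0 ≤ (PySem.List.min? wallet (fun x => x)).getD 0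
      ∧ (PySem.List.max? bill (fun x => x)).getD 0 ≤ (PySem.List.max? wallet (fun x => x)).getD 0)
    ∨ (2 ≤ bill.length
        ∧ (∀ x ∈ bill.drop 2, x ≤ (PySem.List.max? wallet (fun x => x)).getD 0)
        ∧ (0 ≤ (PySem.List.min? wallet (fun x => x)).getD 0
           ∨ ((PySem.List.min? bill (fun x => x)).getD 0 ≤ (PySem.List.min? wallet (fun x => x)).getD 0
              ∧ 0 ≤ (PySem.List.max? wallet (fun x => x)).getD 0))) )

instance (wallet : List Int) (bill : List Int) (count : Int) : Decidable (Pre_fold_money wallet bill count) := by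
  unfold Pre_fold_money; infer_instance

def pvWitness_fold_money : List Int × List Int × Int := ([30, 15], [50, 100], 0)

def Spec_fold_money (wallet : List Int) (bill : List Int) (count : Int) (out : Int) : Prop := out = fold_money_alt wallet bill count
instance (wallet : List Int) (bill : List Int) (count : Int) (out : Int) : Decidable (Spec_fold_money wallet bill count out) := by unfold Spec_fold_money; infer_instance

-- ===== CLAIM (what is proved, stated in full; the proofs are below) =====
def Claim_equal_fold_money : Prop := ∀ (wallet : List Int) (bill : List Int) (count : Int), Dom_fold_money wallet bill count → Pre_fold_money wallet bill count → Spec_fold_money wallet bill count (fold_money wallet bill count)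

-- ===== LEMMAS AND PROOFS =====
-- The two loops take the same step on the same bill; A threads count, B counts from 0.
theorem foldMoneyGoA_eq_count_add (n : Nat) :
    ∀ (wallet bill : List Int) (count : Int),
      foldMoneyGoA n wallet bill count
        = count + (foldCountB n ((PySem.List.min? wallet (fun x => x)).getD 0)
            ((PySem.List.max? wallet (fun x => x)).getD 0) bill : Nat) := by
  induction n with
  | zero => intro wallet bill count; simp [foldMoneyGoA, foldCountB]
  | succ n ih =>
    intro wallet bill count
    simp only [foldMoneyGoA, foldCountB]
    split
    · by_cases h : PySem.List.pyGetD bill 0 0 > PySem.List.pyGetD bill 1 0 <;>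
        simp only [h, if_pos, ih] <;> push_cast <;> ring
    · simp

theorem fold_money_spec : Claim_equal_fold_money := by
  intro wallet bill count _ _
  unfold Spec_fold_money fold_money fold_money_alt
  exact foldMoneyGoA_eq_count_add _ wallet bill count
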